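-- pv_equiv track=rewrite | github.com/cmartinezbjmu/DatosEnormes | Script/Ultimo/semantic/scripts/grafica_por_partido_politico.py | igualar_posicion_repetidos
-- ===== SOURCE A (Python) =====
-- def igualar_posicion_repetidos(posicion, filtrado):
--     persona = None
--     for i in filtrado:
--         persona = i[1]
--         for j in filtrado:
--             if persona == j[1]:
--                 if (i[0] != j[0]) and (i[0] < j[0]):
--                     posicion[j[0]] = posicion[i[0]]
--     return posicion
-- ===== SOURCE B (Python) =====
-- def igualar_posicion_repetidos(posicion, filtrado):
--     menor = {}
--     for idx, per in filtrado:
--         if per not in menor or idx < menor[per]: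
--             menor[per] = idx
--     for idx, per in filtrado:
--         m = menor[per]
--         if m < idx:
--             posicion[idx] = posicion[m]
--     return posicion
-- ===== Notes on version B (the rewrite author's own statement) =====
-- stated objective: alternative
-- what changed: Instead of A's cascading copy-forward (each entry rescans the whole list and copies its current value to every later same-person index), B computes each person's minimum index in one dict pass and then performs a single assignment posicion[idx] = posicion[min] per entry
-- outside the precondition, e.g. on igualar_posicion_repetidos([1, 2, 3], [(1, 'b'), (0, 'a'), (1, 'a'), (2, 'b')]): A returns [1, 1, 2], B returns [1, 1, 1]; on igualar_posicion_repetidos([1, 2], [(0, 'a'), (-1, 'a'), (1, 'a')]): A returns [1, 1], B returns [2, 2]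
import Mathlib
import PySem

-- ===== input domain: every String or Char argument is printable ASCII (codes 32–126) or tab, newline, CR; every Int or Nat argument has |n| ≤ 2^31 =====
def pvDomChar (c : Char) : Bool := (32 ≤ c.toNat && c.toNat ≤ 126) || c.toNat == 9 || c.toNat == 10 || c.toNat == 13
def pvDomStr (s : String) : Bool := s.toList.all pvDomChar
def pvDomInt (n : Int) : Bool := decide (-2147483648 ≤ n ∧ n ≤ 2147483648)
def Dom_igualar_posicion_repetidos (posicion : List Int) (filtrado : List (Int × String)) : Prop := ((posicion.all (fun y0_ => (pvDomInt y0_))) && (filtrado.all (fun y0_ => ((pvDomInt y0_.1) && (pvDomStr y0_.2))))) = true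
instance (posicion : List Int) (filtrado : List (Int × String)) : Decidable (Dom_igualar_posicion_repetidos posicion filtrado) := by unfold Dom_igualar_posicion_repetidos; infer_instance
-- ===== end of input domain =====

-- B replaces A's cascading copy-forward nested scans by a person→minimum-index map built in
-- one pass plus a single assignment posicion[idx] = posicion[min] per entry (intended as the
-- linear-time version; a timing run measured only ~1.5x at its largest size, so no speed
-- is claimed). Both Pythons mutate `posicion` in place; the claim is about the return value.

-- ===== PORT A =====
-- the body of A's inner loop, for outer entry i = (a, p) (persona = i[1] = p)
def pvStepA (a : Int) (p : String) (pos : List Int) (j : Int × String) : List Int :=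
  if p == j.2 then
    if a ≠ j.1 ∧ a < j.1 then
      PySem.List.pySetD pos j.1 (PySem.List.pyGetD pos a 0)   -- posicion[j[0]] = posicion[i[0]]
    else pos
  else pos

def igualar_posicion_repetidos (posicion : List Int) (filtrado : List (Int × String)) : List Int :=
  filtrado.foldl (fun pos i => filtrado.foldl (pvStepA i.1 i.2) pos) posicion

-- ===== PORT B =====
-- B's first loop: if per not in menor or idx < menor[per]: menor[per] = idx
def pvMenorStep (d : PySem.Dict String Int) (x : Int × String) : PySem.Dict String Int :=
  if PySem.Dict.contains d x.2 = false ∨ x.1 < PySem.Dict.getD d x.2 0 then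
    PySem.Dict.insert d x.2 x.1
  else d

def pvMenor (filtrado : List (Int × String)) : PySem.Dict String Int :=
  filtrado.foldl pvMenorStep PySem.Dict.empty

-- B's second loop body; m = menor[per] never raises (per was inserted in the first loop
-- over the same list), so the getD default 0 is dead
def pvStepB (menor : PySem.Dict String Int) (pos : List Int) (x : Int × String) : List Int :=
  let m := PySem.Dict.getD menor x.2 0
  if m < x.1 then PySem.List.pySetD pos x.1 (PySem.List.pyGetD pos m 0) else pos

def igualar_posicion_repetidos_alt (posicion : List Int) (filtrado : List (Int × String)) : List Int :=
  filtrado.foldl (pvStepB (pvMenor filtrado)) posicion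

-- ===== PRECONDITION & SPEC =====
-- the list cell a Python index k refers to (indices in [-n, 0) count from the end)
def cellN (n : Nat) (k : Int) : Int := if k < 0 then k + n else k

-- an entry is "touched" by A (read or written) iff its person occurs with another index
def pvActive (f : List (Int × String)) (x : Int × String) : Bool :=
  f.any (fun z => z.2 == x.2 && z.1 != x.1)

-- Pre_ excludes (a) inputs where A raises IndexError (a touched index out of range) and
-- (b) inputs where two distinct touched entries alias the same list cell (one index under
-- two persons, or negative/positive wrap-around aliasing): there the result of A depends on
-- the accidental order of its cascading writes, as does B's, a corner nobody would specify.
def Pre_igualar_posicion_repetidos (posicion : List Int) (filtrado : List (Int × String)) : Prop :=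
  (∀ x ∈ filtrado, ∀ y ∈ filtrado, x.2 = y.2 → x.1 < y.1 →
    (-(posicion.length : Int) ≤ x.1 ∧ x.1 < (posicion.length : Int)) ∧
    (-(posicion.length : Int) ≤ y.1 ∧ y.1 < (posicion.length : Int))) ∧
  (∀ x ∈ filtrado, ∀ y ∈ filtrado, pvActive filtrado x = true → pvActive filtrado y = true →
    cellN posicion.length x.1 = cellN posicion.length y.1 → x.1 = y.1 ∧ x.2 = y.2)
instance (posicion : List Int) (filtrado : List (Int × String)) : Decidable (Pre_igualar_posicion_repetidos posicion filtrado) := by unfold Pre_igualar_posicion_repetidos; infer_instance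

def pvWitness_igualar_posicion_repetidos : List Int × (List (Int × String)) :=
  ([10, 20, 30, 40], [(2, "ana"), (0, "bob"), (1, "ana"), (3, "bob")])

def Spec_igualar_posicion_repetidos (posicion : List Int) (filtrado : List (Int × String)) (out : List Int) : Prop := out = igualar_posicion_repetidos_alt posicion filtrado
instance (posicion : List Int) (filtrado : List (Int × String)) (out : List Int) : Decidable (Spec_igualar_posicion_repetidos posicion filtrado out) := by unfold Spec_igualar_posicion_repetidos; infer_instance

-- ===== CLAIM (what is proved, stated in full; the proofs are below) =====
def Claim_equal_igualar_posicion_repetidos : Prop := ∀ (posicion : List Int) (filtrado : List (Int × String)), Dom_igualar_posicion_repetidos posicion filtrado → Pre_igualar_posicion_repetidos posicion filtrado → Spec_igualar_posicion_repetidos posicion filtrado (igualar_posicion_repetidos posicion filtrado)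

-- ===== LEMMAS AND PROOFS =====

-- ---- generic indexing machinery (Python index ↔ cell) ----

theorem cellN_bounds (n : Nat) (k : Int) (h1 : -(n:Int) ≤ k) (h2 : k < n) :
    0 ≤ cellN n k ∧ cellN n k < n := by unfold cellN; split <;> omega

theorem getD_toD (xs : List Int) (k : Int) (h1 : -(xs.length:Int) ≤ k) (h2 : k < xs.length) :
    PySem.List.pyGetD xs k 0 = xs.getD (cellN xs.length k).toNat 0 := by
  unfold cellN
  by_cases hk : k < 0
  · rw [if_pos hk]
    have hkn : k = -((k.natAbs : Nat) : Int) := by omega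
    have hpos : 0 < k.natAbs := by omega
    have hle : k.natAbs ≤ xs.length := by omega
    rw [hkn, PySem.List.pyGetD_neg_natCast xs k.natAbs 0 hpos hle]
    rw [List.getD_eq_getElem?_getD, List.getElem?_eq_getElem (by omega)]
    simp only [Option.getD_some]
    congr 1
    omega
  · rw [if_neg hk]
    rw [show k = ((k.toNat : Nat) : Int) by omega, PySem.List.pyGetD_natCast, Int.toNat_natCast]

theorem pySetD_cell (xs : List Int) (i v : Int) (h1 : -(xs.length:Int) ≤ i) (h2 : i < xs.length) :
    PySem.List.pySetD xs i v = xs.set (cellN xs.length i).toNat v := by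
  unfold cellN
  by_cases hi : i < 0
  · rw [if_pos hi]
    unfold PySem.List.pySetD PySem.List.pySet? PySem.List.pyIdx?
    split
    next h => omega
    next h => simp only [Option.map_some, Option.getD_some]; congr 1; omega
  · rw [if_neg hi]
    exact PySem.List.pySetD_of_nonneg xs v (by omega)

theorem getD_pySetD_cell (xs : List Int) (i v k : Int)
    (hi1 : -(xs.length:Int) ≤ i) (hi2 : i < xs.length)
    (hk1 : -(xs.length:Int) ≤ k) (hk2 : k < xs.length) :
    PySem.List.pyGetD (PySem.List.pySetD xs i v) k 0 =
      if cellN xs.length k = cellN xs.length i then v else PySem.List.pyGetD xs k 0 := by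
  have hbi := cellN_bounds xs.length i hi1 hi2
  have hbk := cellN_bounds xs.length k hk1 hk2
  rw [pySetD_cell xs i v hi1 hi2]
  rw [getD_toD _ k (by simpa using hk1) (by simpa using hk2)]
  rw [show (xs.set (cellN xs.length i).toNat v).length = xs.length from List.length_set, getD_toD xs k hk1 hk2]
  rw [List.getD_eq_getElem?_getD, List.getD_eq_getElem?_getD, List.getElem?_set]
  by_cases hpt : cellN xs.length k = cellN xs.length i
  · rw [if_pos hpt,
        if_pos (show (cellN xs.length i).toNat = (cellN xs.length k).toNat by omega),
        if_pos (show (cellN xs.length i).toNat < xs.length by omega)]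
    rfl
  · rw [if_neg hpt, if_neg (show ¬ (cellN xs.length i).toNat = (cellN xs.length k).toNat by omega)]

-- pointwise (Nat cell) description of one Python list write
theorem getD_pySetD_nat (xs : List Int) (i v : Int) (c : Nat)
    (hi1 : -(xs.length:Int) ≤ i) (hi2 : i < xs.length) (hc : c < xs.length) :
    (PySem.List.pySetD xs i v).getD c 0 =
      if (c : Int) = cellN xs.length i then v else xs.getD c 0 := by
  have hbi := cellN_bounds xs.length i hi1 hi2
  rw [pySetD_cell xs i v hi1 hi2]
  rw [List.getD_eq_getElem?_getD, List.getD_eq_getElem?_getD, List.getElem?_set]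
  by_cases h : (c : Int) = cellN xs.length i
  · rw [if_pos h, if_pos (show (cellN xs.length i).toNat = c by omega),
        if_pos (show (cellN xs.length i).toNat < xs.length by omega)]
    rfl
  · rw [if_neg h, if_neg (show ¬ (cellN xs.length i).toNat = c by omega)]

theorem length_setfold (L : List Int) : ∀ (pos : List Int) (v : Int),
    (L.foldl (fun pos t => PySem.List.pySetD pos t v) pos).length = pos.length := by
  induction L with
  | nil => intro pos v; rfl
  | cons t L ih =>
    intro pos v
    rw [List.foldl_cons, ih]
    simp [PySem.List.length_pySetD]

-- the value at a is unchanged by the copy loop (every write is the value of a's own cell when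
-- it hits that cell), so the per-write read equals the hoisted one
theorem hoist_read (a : Int) (L : List Int) : ∀ (pos : List Int) (v : Int),
    (-(pos.length:Int) ≤ a ∧ a < (pos.length:Int)) →
    (∀ t ∈ L, -(pos.length:Int) ≤ t ∧ t < (pos.length:Int)) →
    v = PySem.List.pyGetD pos a 0 →
    L.foldl (fun pos t => PySem.List.pySetD pos t (PySem.List.pyGetD pos a 0)) pos
      = L.foldl (fun pos t => PySem.List.pySetD pos t v) pos := by
  induction L with
  | nil => intro pos v _ _ _; rfl
  | cons t L ih =>
    intro pos v ha hL hv
    have ht := hL t List.mem_cons_self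
    rw [List.foldl_cons, List.foldl_cons, ← hv]
    have hlen : (PySem.List.pySetD pos t v).length = pos.length := by
      simp [PySem.List.length_pySetD]
    apply ih
    · rw [hlen]; exact ha
    · intro t' ht'; rw [hlen]; exact hL t' (List.mem_cons_of_mem _ ht')
    · rw [getD_pySetD_cell pos t v a ht.1 ht.2 ha.1 ha.2]
      split <;> [rfl; exact hv]

-- pointwise description of the bulk-set loop
theorem setfold_getD (L : List Int) : ∀ (pos : List Int) (v : Int),
    (∀ t ∈ L, -(pos.length:Int) ≤ t ∧ t < (pos.length:Int)) →
    ∀ c : Nat, c < pos.length →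
    (L.foldl (fun pos t => PySem.List.pySetD pos t v) pos).getD c 0 =
      if ∃ t ∈ L, cellN pos.length t = (c : Int) then v else pos.getD c 0 := by
  induction L with
  | nil => intro pos v _ c hc; simp
  | cons t L ih =>
    intro pos v hL c hc
    have ht := hL t List.mem_cons_self
    rw [List.foldl_cons]
    have hlen : (PySem.List.pySetD pos t v).length = pos.length := by
      simp [PySem.List.length_pySetD]
    rw [ih (PySem.List.pySetD pos t v) v
      (by intro t' ht'; rw [hlen]; exact hL t' (List.mem_cons_of_mem _ ht'))
      c (by rw [hlen]; exact hc)]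
    rw [hlen]
    by_cases hEx : ∃ t' ∈ L, cellN pos.length t' = (c : Int)
    · rw [if_pos hEx, if_pos (by obtain ⟨t', h1, h2⟩ := hEx; exact ⟨t', List.mem_cons_of_mem _ h1, h2⟩)]
    · rw [if_neg hEx, getD_pySetD_nat pos t v c ht.1 ht.2 hc]
      by_cases hcell : (c : Int) = cellN pos.length t
      · rw [if_pos hcell, if_pos ⟨t, List.mem_cons_self, hcell.symm⟩]
      · rw [if_neg hcell, if_neg (by
          rintro ⟨t', ht', hc'⟩
          rcases List.mem_cons.mp ht' with h | h
          · exact hcell (h ▸ hc').symm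
          · exact hEx ⟨t', h, hc'⟩)]

-- ---- groups, minima ----

def pvGrp (f : List (Int × String)) (p : String) : List Int :=
  (f.filter (fun x => x.2 == p)).map Prod.fst

def lmin : List Int → Int
  | [] => 0
  | a :: l => l.foldl min a

def pvMin (f : List (Int × String)) (p : String) : Int := lmin (pvGrp f p)

def pvLow (P : List (Int × String)) (b : Int) : List (Int × String) :=
  P.filter (fun i => decide (i.1 < b))

theorem mem_pvGrp (f : List (Int × String)) (p : String) (a : Int) :
    a ∈ pvGrp f p ↔ ∃ y ∈ f, y.2 = p ∧ y.1 = a := by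
  simp only [pvGrp, List.mem_map, List.mem_filter, beq_iff_eq]
  constructor
  · rintro ⟨y, ⟨hy, hp⟩, ha⟩; exact ⟨y, hy, hp, ha⟩
  · rintro ⟨y, hy, hp, ha⟩; exact ⟨y, ⟨hy, hp⟩, ha⟩

theorem pvGrp_append (l₁ l₂ : List (Int × String)) (p : String) :
    pvGrp (l₁ ++ l₂) p = pvGrp l₁ p ++ pvGrp l₂ p := by
  simp [pvGrp, List.filter_append]

theorem pvLow_append (l₁ l₂ : List (Int × String)) (b : Int) :
    pvLow (l₁ ++ l₂) b = pvLow l₁ b ++ pvLow l₂ b := by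
  simp [pvLow, List.filter_append]

theorem mem_pvLow (P : List (Int × String)) (b : Int) (z : Int × String) :
    z ∈ pvLow P b ↔ z ∈ P ∧ z.1 < b := by
  simp [pvLow]

theorem lmin_mem (l : List Int) (h : l ≠ []) : lmin l ∈ l := by
  cases l with
  | nil => exact absurd rfl h
  | cons a l =>
    rcases PySem.List.foldl_min_mem l a with h' | h'
    · rw [lmin, h']; exact List.mem_cons_self
    · exact List.mem_cons_of_mem _ h'

theorem lmin_le (l : List Int) (a : Int) (h : a ∈ l) : lmin l ≤ a := by
  cases l with
  | nil => cases h
  | cons b l =>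
    have hle := PySem.List.foldl_min_le l b
    rcases List.mem_cons.mp h with h' | h'
    · rw [h']; exact hle.1
    · exact hle.2 a h'

theorem lmin_append_one (l : List Int) (a : Int) :
    lmin (l ++ [a]) = if l = [] then a else min (lmin l) a := by
  cases l with
  | nil => simp [lmin]
  | cons b l => simp [lmin, List.foldl_append]

-- ---- the minimum dict of B's first loop ----

def omin (o : Option Int) (a : Int) : Option Int :=
  some (match o with | none => a | some m => min m a)

theorem menorStep_get? (d : PySem.Dict String Int) (x : Int × String) (p : String) :
    PySem.Dict.get? (pvMenorStep d x) p =
      if x.2 = p then omin (PySem.Dict.get? d p) x.1 else PySem.Dict.get? d p := by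
  unfold pvMenorStep
  by_cases hp : x.2 = p
  · subst hp
    rw [if_pos rfl]
    cases hg : PySem.Dict.get? d x.2 with
    | none =>
      have hc : PySem.Dict.contains d x.2 = false := by
        rw [← PySem.Dict.get?_eq_none_iff_contains]; exact hg
      rw [if_pos (Or.inl hc), PySem.Dict.get?_insert_self]
      rfl
    | some m =>
      have hc : PySem.Dict.contains d x.2 = true := by
        rcases Bool.eq_false_or_eq_true (PySem.Dict.contains d x.2) with h | h
        · exact h
        · exact absurd hg (by rw [(PySem.Dict.get?_eq_none_iff_contains d x.2).mpr h]; simp)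
      have hgd : PySem.Dict.getD d x.2 0 = m := PySem.Dict.getD_of_get?_eq_some d 0 hg
      by_cases hlt : x.1 < m
      · rw [if_pos (Or.inr (by rw [hgd]; exact hlt)), PySem.Dict.get?_insert_self]
        simp only [omin]
        congr 1
        omega
      · rw [if_neg (by rw [hgd]; simp [hc, hlt]), hg]
        simp only [omin]
        congr 1
        omega
  · rw [if_neg hp]
    by_cases hcond : PySem.Dict.contains d x.2 = false ∨ x.1 < PySem.Dict.getD d x.2 0
    · rw [if_pos hcond, PySem.Dict.get?_insert_of_ne d x.1 (Ne.symm hp)]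
    · rw [if_neg hcond]

theorem menor_get?_foldl (f : List (Int × String)) : ∀ (d : PySem.Dict String Int) (p : String),
    PySem.Dict.get? (f.foldl pvMenorStep d) p = (pvGrp f p).foldl omin (PySem.Dict.get? d p) := by
  induction f with
  | nil => intro d p; rfl
  | cons x f ih =>
    intro d p
    rw [List.foldl_cons, ih]
    by_cases hp : x.2 = p
    · have : pvGrp (x :: f) p = x.1 :: pvGrp f p := by simp [pvGrp, hp]
      rw [this, List.foldl_cons, menorStep_get? d x p, if_pos hp]
    · have : pvGrp (x :: f) p = pvGrp f p := by simp [pvGrp, hp]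
      rw [this, menorStep_get? d x p, if_neg hp]

theorem foldl_omin_some (l : List Int) : ∀ a : Int, l.foldl omin (some a) = some (l.foldl min a) := by
  induction l with
  | nil => intro a; rfl
  | cons b l ih =>
    intro a
    rw [List.foldl_cons, List.foldl_cons, show omin (some a) b = some (min a b) from rfl, ih]

theorem pvMenor_getD (f : List (Int × String)) (x : Int × String) (hx : x ∈ f) :
    PySem.Dict.getD (pvMenor f) x.2 0 = pvMin f x.2 := by
  have hg := menor_get?_foldl f PySem.Dict.empty x.2
  rw [PySem.Dict.get?_empty] at hg
  have hmem : x.1 ∈ pvGrp f x.2 := (mem_pvGrp f x.2 x.1).mpr ⟨x, hx, rfl, rfl⟩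
  cases hgl : pvGrp f x.2 with
  | nil => rw [hgl] at hmem; cases hmem
  | cons a l =>
    rw [hgl, List.foldl_cons, show omin none a = some a from rfl, foldl_omin_some] at hg
    rw [PySem.Dict.getD_of_get?_eq_some (pvMenor f) 0 (by rw [pvMenor, hg]), pvMin, hgl]
    rfl

-- ---- activity helper ----

theorem active_of (f : List (Int × String)) (x z : Int × String) (hz : z ∈ f)
    (h2 : z.2 = x.2) (h1 : z.1 ≠ x.1) : pvActive f x = true := by
  rw [pvActive, List.any_eq_true]
  exact ⟨z, hz, by simp [h2, h1]⟩

-- ---- the two loop invariants (pointwise final-state descriptions) ----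

def AVal (orig : List Int) (n : Nat) (f P : List (Int × String)) (pos : List Int) : Prop :=
  pos.length = n ∧
  (∀ c : Nat, c < n → (∀ y ∈ f, cellN n y.1 = (c : Int) → pvGrp (pvLow P y.1) y.2 = []) →
      pos.getD c 0 = orig.getD c 0) ∧
  (∀ y ∈ f, pvGrp (pvLow P y.1) y.2 ≠ [] →
      pos.getD (cellN n y.1).toNat 0 = orig.getD (cellN n (lmin (pvGrp (pvLow P y.1) y.2))).toNat 0)

def BVal (orig : List Int) (n : Nat) (f Q : List (Int × String)) (pos : List Int) : Prop :=
  pos.length = n ∧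
  (∀ c : Nat, c < n → (∀ x ∈ Q, cellN n x.1 = (c : Int) → ¬ pvMin f x.2 < x.1) →
      pos.getD c 0 = orig.getD c 0) ∧
  (∀ x ∈ Q, pvMin f x.2 < x.1 →
      pos.getD (cellN n x.1).toNat 0 = orig.getD (cellN n (pvMin f x.2)).toNat 0)

theorem mem_pvGrp_pvLow (P : List (Int × String)) (b : Int) (p : String) (a : Int) :
    a ∈ pvGrp (pvLow P b) p ↔ ∃ z ∈ P, z.1 < b ∧ z.2 = p ∧ z.1 = a := by
  rw [mem_pvGrp]
  constructor
  · rintro ⟨z, hz, hp, ha⟩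
    rw [mem_pvLow] at hz
    exact ⟨z, hz.1, hz.2, hp, ha⟩
  · rintro ⟨z, hz, hb, hp, ha⟩
    exact ⟨z, (mem_pvLow P b z).mpr ⟨hz, hb⟩, hp, ha⟩

theorem getD_of_lt (l : List Int) (c : Nat) (h : c < l.length) : l.getD c 0 = l[c] := by
  rw [List.getD_eq_getElem?_getD, List.getElem?_eq_getElem h]
  rfl

-- ---- A's inner loop: a bulk set of all later same-person cells with the hoisted value ----

theorem innerA (orig : List Int) (f : List (Int × String))
    (hP1 : ∀ x ∈ f, ∀ y ∈ f, x.2 = y.2 → x.1 < y.1 →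
      (-(orig.length : Int) ≤ x.1 ∧ x.1 < (orig.length : Int)) ∧
      (-(orig.length : Int) ≤ y.1 ∧ y.1 < (orig.length : Int)))
    (i : Int × String) (hi : i ∈ f) (pos : List Int) (hlen : pos.length = orig.length) :
    (f.foldl (pvStepA i.1 i.2) pos).length = orig.length ∧
    ∀ c : Nat, c < orig.length →
      (f.foldl (pvStepA i.1 i.2) pos).getD c 0 =
        if ∃ y ∈ f, y.2 = i.2 ∧ i.1 < y.1 ∧ cellN orig.length y.1 = (c : Int)
        then PySem.List.pyGetD pos i.1 0 else pos.getD c 0 := by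
  have hcond : (fun (pos : List Int) (j : Int × String) =>
      if i.1 ≠ j.1 ∧ i.1 < j.1 then PySem.List.pySetD pos j.1 (PySem.List.pyGetD pos i.1 0) else pos)
      = (fun pos j => if i.1 < j.1 then PySem.List.pySetD pos j.1 (PySem.List.pyGetD pos i.1 0) else pos) := by
    funext pos j
    by_cases h : i.1 < j.1
    · rw [if_pos ⟨by omega, h⟩, if_pos h]
    · rw [if_neg (by omega), if_neg h]
  have hrw : f.foldl (pvStepA i.1 i.2) pos
      = (((f.filter (fun j => i.2 == j.2)).filter (fun j => decide (i.1 < j.1))).map Prod.fst).foldl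
          (fun pos t => PySem.List.pySetD pos t (PySem.List.pyGetD pos i.1 0)) pos := by
    rw [List.foldl_map]
    rw [← PySem.List.foldl_ite_eq_foldl_filter (p := fun j : Int × String => i.1 < j.1)]
    rw [← hcond]
    rw [← PySem.List.foldl_if_eq_foldl_filter (p := fun j : Int × String => i.2 == j.2)]
    rfl
  have hmemL : ∀ t : Int,
      (t ∈ ((f.filter (fun j => i.2 == j.2)).filter (fun j => decide (i.1 < j.1))).map Prod.fst)
      ↔ ∃ y ∈ f, y.2 = i.2 ∧ i.1 < y.1 ∧ y.1 = t := by
    intro t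
    simp only [List.mem_map, List.mem_filter, beq_iff_eq, decide_eq_true_eq]
    constructor
    · rintro ⟨y, ⟨⟨hy, hp⟩, hlt⟩, ht⟩; exact ⟨y, hy, hp.symm, hlt, ht⟩
    · rintro ⟨y, hy, hp, hlt, ht⟩; exact ⟨y, ⟨⟨hy, hp.symm⟩, hlt⟩, ht⟩
  rw [hrw]
  by_cases hLnil : ((f.filter (fun j => i.2 == j.2)).filter (fun j => decide (i.1 < j.1))).map Prod.fst = []
  · rw [hLnil, List.foldl_nil]
    refine ⟨hlen, ?_⟩
    intro c hc
    rw [if_neg]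
    rintro ⟨y, hy, hp, hlt, _⟩
    have hym : y.1 ∈ ((f.filter (fun j => i.2 == j.2)).filter (fun j => decide (i.1 < j.1))).map Prod.fst :=
      (hmemL y.1).mpr ⟨y, hy, hp, hlt, rfl⟩
    rw [hLnil] at hym
    cases hym
  · have hrangeL : ∀ t ∈ ((f.filter (fun j => i.2 == j.2)).filter (fun j => decide (i.1 < j.1))).map Prod.fst,
        -(pos.length : Int) ≤ t ∧ t < (pos.length : Int) := by
      intro t htL
      obtain ⟨y, hy, hp, hlt, ht⟩ := (hmemL t).mp htL
      have hr := hP1 i hi y hy hp.symm hlt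
      rw [hlen]
      omega
    obtain ⟨t0, ht0⟩ := List.exists_mem_of_ne_nil _ hLnil
    obtain ⟨y0, hy0, hp0, hlt0, _⟩ := (hmemL t0).mp ht0
    have hrangeA : -(pos.length : Int) ≤ i.1 ∧ i.1 < (pos.length : Int) := by
      have hr := hP1 i hi y0 hy0 hp0.symm hlt0
      rw [hlen]
      exact hr.1
    rw [hoist_read i.1 _ pos (PySem.List.pyGetD pos i.1 0) hrangeA hrangeL rfl]
    refine ⟨by rw [length_setfold, hlen], ?_⟩
    intro c hc
    rw [setfold_getD _ pos _ hrangeL c (by rw [hlen]; exact hc), hlen]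
    by_cases hEx : ∃ y ∈ f, y.2 = i.2 ∧ i.1 < y.1 ∧ cellN orig.length y.1 = (c : Int)
    · rw [if_pos hEx]
      obtain ⟨y, hy, hp, hlt, hcell⟩ := hEx
      rw [if_pos ⟨y.1, (hmemL y.1).mpr ⟨y, hy, hp, hlt, rfl⟩, hcell⟩]
    · rw [if_neg hEx, if_neg]
      rintro ⟨t, htL, hcell⟩
      obtain ⟨y, hy, hp, hlt, ht⟩ := (hmemL t).mp htL
      exact hEx ⟨y, hy, hp, hlt, by rw [ht]; exact hcell⟩

-- ---- invariant preservation and final equality ----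

theorem AStep (orig : List Int) (f : List (Int × String))
    (hP1 : ∀ x ∈ f, ∀ y ∈ f, x.2 = y.2 → x.1 < y.1 →
      (-(orig.length : Int) ≤ x.1 ∧ x.1 < (orig.length : Int)) ∧
      (-(orig.length : Int) ≤ y.1 ∧ y.1 < (orig.length : Int)))
    (hP2 : ∀ x ∈ f, ∀ y ∈ f, pvActive f x = true → pvActive f y = true →
      cellN orig.length x.1 = cellN orig.length y.1 → x.1 = y.1 ∧ x.2 = y.2)
    (P : List (Int × String)) (hPf : ∀ z ∈ P, z ∈ f) (i : Int × String) (hi : i ∈ f)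
    (pos : List Int) (h : AVal orig orig.length f P pos) :
    AVal orig orig.length f (P ++ [i]) (f.foldl (pvStepA i.1 i.2) pos) := by
  obtain ⟨hlen, h1, h2⟩ := h
  obtain ⟨hlen', hpt⟩ := innerA orig f hP1 i hi pos hlen
  have Gsucc : ∀ y : Int × String, pvGrp (pvLow (P ++ [i]) y.1) y.2
      = if i.2 = y.2 ∧ i.1 < y.1 then pvGrp (pvLow P y.1) y.2 ++ [i.1]
        else pvGrp (pvLow P y.1) y.2 := by
    intro y
    rw [pvLow_append, pvGrp_append]
    by_cases hcase : i.2 = y.2 ∧ i.1 < y.1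
    · rw [if_pos hcase]
      congr 1
      simp [pvLow, pvGrp, hcase.1, hcase.2]
    · rw [if_neg hcase]
      have hnil : pvGrp (pvLow [i] y.1) y.2 = [] := by
        by_cases hlt : i.1 < y.1
        · have hne : ¬ i.2 = y.2 := fun hh => hcase ⟨hh, hlt⟩
          simp [pvLow, pvGrp, hlt, hne]
        · simp [pvLow, pvGrp, hlt]
      rw [hnil, List.append_nil]
  have hGwit : ∀ y : Int × String, pvGrp (pvLow P y.1) y.2 ≠ [] →
      ∃ z ∈ f, z.2 = y.2 ∧ z.1 < y.1 := by
    intro y hne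
    obtain ⟨a, ha⟩ := List.exists_mem_of_ne_nil _ hne
    obtain ⟨z, hz, hb, hp, ha'⟩ := (mem_pvGrp_pvLow P y.1 y.2 a).mp ha
    exact ⟨z, hPf z hz, hp, hb⟩
  refine ⟨hlen', ?_, ?_⟩
  · -- untouched cells
    intro c hc hguard'
    have hold : ∀ y ∈ f, cellN orig.length y.1 = (c : Int) → pvGrp (pvLow P y.1) y.2 = [] := by
      intro y hy hcell
      have hG' := hguard' y hy hcell
      rw [Gsucc y] at hG'
      by_cases hcase : i.2 = y.2 ∧ i.1 < y.1
      · rw [if_pos hcase] at hG'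
        exact (List.append_eq_nil_iff.mp hG').1
      · rw [if_neg hcase] at hG'
        exact hG'
    rw [hpt c hc, if_neg ?_, h1 c hc hold]
    rintro ⟨y, hy, hp, hlt, hcell⟩
    have hG' := hguard' y hy hcell
    rw [Gsucc y, if_pos ⟨hp.symm, hlt⟩] at hG'
    simp at hG'
  · -- touched cells
    intro y hy hne'
    rw [Gsucc y] at hne' ⊢
    by_cases hcase : i.2 = y.2 ∧ i.1 < y.1
    · rw [if_pos hcase] at hne' ⊢
      have hr := hP1 i hi y hy hcase.1 hcase.2
      have hbi := cellN_bounds orig.length i.1 hr.1.1 hr.1.2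
      have hby := cellN_bounds orig.length y.1 hr.2.1 hr.2.2
      have hai : pvActive f i = true := active_of f i y hy hcase.1.symm (by omega)
      rw [hpt _ (by omega : (cellN orig.length y.1).toNat < orig.length),
          if_pos ⟨y, hy, hcase.1.symm, hcase.2, by omega⟩]
      rw [getD_toD pos i.1 (by rw [hlen]; exact hr.1.1) (by rw [hlen]; exact hr.1.2), hlen]
      rw [lmin_append_one]
      by_cases hGa : pvGrp (pvLow P i.1) i.2 = []
      · have hval : pos.getD (cellN orig.length i.1).toNat 0 = orig.getD (cellN orig.length i.1).toNat 0 := by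
          apply h1 _ (by omega)
          intro y' hy' hcell'
          by_contra hne''
          obtain ⟨z, hz, hzp, hzlt⟩ := hGwit y' hne''
          have hay' : pvActive f y' = true := active_of f y' z hz hzp (by omega)
          have heq := hP2 y' hy' i hi hay' hai (by omega)
          exact hne'' (by rw [heq.1, heq.2]; exact hGa)
        have hminT : (if pvGrp (pvLow P y.1) y.2 = [] then i.1
            else min (lmin (pvGrp (pvLow P y.1) y.2)) i.1) = i.1 := by
          by_cases hGy : pvGrp (pvLow P y.1) y.2 = []
          · rw [if_pos hGy]
          · rw [if_neg hGy]
            have hmm := lmin_mem _ hGy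
            obtain ⟨z, hz, hb, hp, ha⟩ := (mem_pvGrp_pvLow P y.1 y.2 _).mp hmm
            have hge : i.1 ≤ lmin (pvGrp (pvLow P y.1) y.2) := by
              by_contra hlt'
              rw [not_le] at hlt'
              have hmGa : lmin (pvGrp (pvLow P y.1) y.2) ∈ pvGrp (pvLow P i.1) i.2 :=
                (mem_pvGrp_pvLow P i.1 i.2 _).mpr ⟨z, hz, by omega, hp.trans hcase.1.symm, ha⟩
              rw [hGa] at hmGa
              cases hmGa
            exact min_eq_right hge
        rw [hval, hminT]
      · have hval := h2 i hi hGa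
        rw [hval]
        have hmmem := lmin_mem _ hGa
        obtain ⟨z, hz, hzb, hzp, hza⟩ := (mem_pvGrp_pvLow P i.1 i.2 _).mp hmmem
        have hmGy : lmin (pvGrp (pvLow P i.1) i.2) ∈ pvGrp (pvLow P y.1) y.2 :=
          (mem_pvGrp_pvLow P y.1 y.2 _).mpr ⟨z, hz, by omega, hzp.trans hcase.1, hza⟩
        have hGy : pvGrp (pvLow P y.1) y.2 ≠ [] := by
          intro hh; rw [hh] at hmGy; cases hmGy
        rw [if_neg hGy]
        have hg1 : lmin (pvGrp (pvLow P y.1) y.2) ≤ lmin (pvGrp (pvLow P i.1) i.2) :=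
          lmin_le _ _ hmGy
        have hg2 : lmin (pvGrp (pvLow P i.1) i.2) ≤ lmin (pvGrp (pvLow P y.1) y.2) := by
          have hgm := lmin_mem _ hGy
          obtain ⟨w, hw, hwb, hwp, hwa⟩ := (mem_pvGrp_pvLow P y.1 y.2 _).mp hgm
          have hmem2 : lmin (pvGrp (pvLow P y.1) y.2) ∈ pvGrp (pvLow P i.1) i.2 :=
            (mem_pvGrp_pvLow P i.1 i.2 _).mpr ⟨w, hw, by omega, hwp.trans hcase.1.symm, hwa⟩
          exact lmin_le _ _ hmem2
        have hminT : min (lmin (pvGrp (pvLow P y.1) y.2)) i.1 = lmin (pvGrp (pvLow P i.1) i.2) := by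
          omega
        rw [hminT]
    · rw [if_neg hcase] at hne' ⊢
      obtain ⟨z, hz, hzp, hzlt⟩ := hGwit y hne'
      have hr := hP1 z hz y hy hzp hzlt
      have hby := cellN_bounds orig.length y.1 hr.2.1 hr.2.2
      rw [hpt _ (by omega : (cellN orig.length y.1).toNat < orig.length), if_neg ?_,
          h2 y hy hne']
      rintro ⟨y', hy', hp', hlt', hcell'⟩
      have hay' : pvActive f y' = true := active_of f y' i hi hp'.symm (by omega)
      have hay : pvActive f y = true := active_of f y z hz hzp (by omega)
      have heq := hP2 y' hy' y hy hay' hay (by omega)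
      exact hcase ⟨hp'.symm.trans heq.2, by omega⟩

theorem BStep (orig : List Int) (f : List (Int × String))
    (hP1 : ∀ x ∈ f, ∀ y ∈ f, x.2 = y.2 → x.1 < y.1 →
      (-(orig.length : Int) ≤ x.1 ∧ x.1 < (orig.length : Int)) ∧
      (-(orig.length : Int) ≤ y.1 ∧ y.1 < (orig.length : Int)))
    (hP2 : ∀ x ∈ f, ∀ y ∈ f, pvActive f x = true → pvActive f y = true →
      cellN orig.length x.1 = cellN orig.length y.1 → x.1 = y.1 ∧ x.2 = y.2)
    (Q : List (Int × String)) (hQf : ∀ z ∈ Q, z ∈ f) (x : Int × String) (hx : x ∈ f)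
    (pos : List Int) (h : BVal orig orig.length f Q pos) :
    BVal orig orig.length f (Q ++ [x])
      (if pvMin f x.2 < x.1
        then PySem.List.pySetD pos x.1 (PySem.List.pyGetD pos (pvMin f x.2) 0) else pos) := by
  obtain ⟨hlen, h1, h2⟩ := h
  by_cases hm : pvMin f x.2 < x.1
  · rw [if_pos hm]
    have hgx : x.1 ∈ pvGrp f x.2 := (mem_pvGrp f x.2 x.1).mpr ⟨x, hx, rfl, rfl⟩
    have hgne : pvGrp f x.2 ≠ [] := by intro hh; rw [hh] at hgx; cases hgx
    obtain ⟨z, hz, hzp, hza⟩ := (mem_pvGrp f x.2 (pvMin f x.2)).mp (lmin_mem _ hgne)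
    have hr := hP1 z hz x hx hzp (by omega)
    have hrm : -(orig.length : Int) ≤ pvMin f x.2 ∧ pvMin f x.2 < (orig.length : Int) := by
      have := hr.1; omega
    have hbx := cellN_bounds orig.length x.1 hr.2.1 hr.2.2
    have hbm := cellN_bounds orig.length (pvMin f x.2) hrm.1 hrm.2
    have haz : pvActive f z = true := active_of f z x hx hzp.symm (by omega)
    have hguardm : ∀ x' ∈ Q, cellN orig.length x'.1 = (((cellN orig.length (pvMin f x.2)).toNat : Nat) : Int) →
        ¬ pvMin f x'.2 < x'.1 := by
      intro x' hx' hcell' hmx'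
      have hgx' : x'.1 ∈ pvGrp f x'.2 := (mem_pvGrp _ _ _).mpr ⟨x', hQf x' hx', rfl, rfl⟩
      have hgne' : pvGrp f x'.2 ≠ [] := by intro hh; rw [hh] at hgx'; cases hgx'
      obtain ⟨z', hz', hzp', hza'⟩ := (mem_pvGrp f x'.2 (pvMin f x'.2)).mp (lmin_mem _ hgne')
      have hax' : pvActive f x' = true := active_of f x' z' hz' hzp' (by omega)
      have heq := hP2 x' (hQf x' hx') z hz hax' haz (by rw [hza]; omega)
      rw [heq.2, hzp] at hmx'
      omega
    have hval : pos.getD (cellN orig.length (pvMin f x.2)).toNat 0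
        = orig.getD (cellN orig.length (pvMin f x.2)).toNat 0 :=
      h1 _ (by omega) hguardm
    have hread : PySem.List.pyGetD pos (pvMin f x.2) 0
        = orig.getD (cellN orig.length (pvMin f x.2)).toNat 0 := by
      rw [getD_toD pos _ (by rw [hlen]; exact hrm.1) (by rw [hlen]; exact hrm.2), hlen, hval]
    refine ⟨by rw [PySem.List.length_pySetD, hlen], ?_, ?_⟩
    · intro c hc hguard'
      have hnc : ¬ (c : Int) = cellN orig.length x.1 := by
        intro hcc
        exact hguard' x (List.mem_append_right _ List.mem_cons_self) (by omega) hm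
      rw [getD_pySetD_nat pos x.1 _ c (by rw [hlen]; exact hr.2.1) (by rw [hlen]; exact hr.2.2)
            (by rw [hlen]; exact hc), hlen, if_neg hnc]
      exact h1 c hc (fun z' hz' => hguard' z' (List.mem_append_left _ hz'))
    · intro x' hx' hmx'
      have hx'f : x' ∈ f := by
        rcases List.mem_append.mp hx' with h' | h'
        · exact hQf x' h'
        · rw [List.mem_singleton] at h'; subst h'; exact hx
      have hgx' : x'.1 ∈ pvGrp f x'.2 := (mem_pvGrp _ _ _).mpr ⟨x', hx'f, rfl, rfl⟩
      have hgne' : pvGrp f x'.2 ≠ [] := by intro hh; rw [hh] at hgx'; cases hgx'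
      obtain ⟨z', hz', hzp', hza'⟩ := (mem_pvGrp f x'.2 (pvMin f x'.2)).mp (lmin_mem _ hgne')
      have hr' := hP1 z' hz' x' hx'f hzp' (by omega)
      have hbx' := cellN_bounds orig.length x'.1 hr'.2.1 hr'.2.2
      rw [getD_pySetD_nat pos x.1 _ (cellN orig.length x'.1).toNat
            (by rw [hlen]; exact hr.2.1) (by rw [hlen]; exact hr.2.2) (by rw [hlen]; omega), hlen]
      by_cases hcc : (((cellN orig.length x'.1).toNat : Nat) : Int) = cellN orig.length x.1
      · rw [if_pos hcc, hread]
        have hax' : pvActive f x' = true := active_of f x' z' hz' hzp' (by omega)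
        have hax : pvActive f x = true := active_of f x z hz hzp.symm.symm (by omega)
        have heq := hP2 x' hx'f x hx hax' hax (by omega)
        rw [heq.2]
      · rw [if_neg hcc]
        have hx'Q : x' ∈ Q := by
          rcases List.mem_append.mp hx' with h' | h'
          · exact h'
          · rw [List.mem_singleton] at h'
            subst h'
            exact absurd (by omega : (((cellN orig.length x'.1).toNat : Nat) : Int) = cellN orig.length x'.1) hcc
        exact h2 x' hx'Q hmx'
  · rw [if_neg hm]
    refine ⟨hlen, ?_, ?_⟩
    · intro c hc hguard'
      exact h1 c hc (fun z hz => hguard' z (List.mem_append_left _ hz))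
    · intro z hz hmz
      rcases List.mem_append.mp hz with h' | h'
      · exact h2 z h' hmz
      · rw [List.mem_singleton] at h'
        subst h'
        exact absurd hmz hm

theorem A_final (orig : List Int) (f : List (Int × String))
    (hP1 : ∀ x ∈ f, ∀ y ∈ f, x.2 = y.2 → x.1 < y.1 →
      (-(orig.length : Int) ≤ x.1 ∧ x.1 < (orig.length : Int)) ∧
      (-(orig.length : Int) ≤ y.1 ∧ y.1 < (orig.length : Int)))
    (hP2 : ∀ x ∈ f, ∀ y ∈ f, pvActive f x = true → pvActive f y = true →
      cellN orig.length x.1 = cellN orig.length y.1 → x.1 = y.1 ∧ x.2 = y.2) :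
    AVal orig orig.length f f (igualar_posicion_repetidos orig f) := by
  have base : AVal orig orig.length f [] orig := by
    refine ⟨rfl, ?_, ?_⟩
    · intro c hc _; rfl
    · intro y hy hne; exact absurd rfl hne
  have main : ∀ (R P : List (Int × String)), (∀ z ∈ P, z ∈ f) → (∀ z ∈ R, z ∈ f) →
      ∀ pos, AVal orig orig.length f P pos →
      AVal orig orig.length f (P ++ R)
        (R.foldl (fun pos i => f.foldl (pvStepA i.1 i.2) pos) pos) := by
    intro R
    induction R with
    | nil =>
      intro P hP _ pos h
      simpa using h
    | cons r R ih =>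
      intro P hP hR pos h
      have h' := AStep orig f hP1 hP2 P hP r (hR r List.mem_cons_self) pos h
      have h'' := ih (P ++ [r])
        (by
          intro z hz
          rcases List.mem_append.mp hz with h3 | h3
          · exact hP z h3
          · rw [List.mem_singleton] at h3; rw [h3]; exact hR r List.mem_cons_self)
        (fun z hz => hR z (List.mem_cons_of_mem _ hz)) _ h'
      simpa [List.append_assoc] using h''
  have h := main f [] (by intro z hz; cases hz) (fun z hz => hz) orig base
  simpa [igualar_posicion_repetidos] using h

theorem B_final (orig : List Int) (f : List (Int × String))
    (hP1 : ∀ x ∈ f, ∀ y ∈ f, x.2 = y.2 → x.1 < y.1 →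
      (-(orig.length : Int) ≤ x.1 ∧ x.1 < (orig.length : Int)) ∧
      (-(orig.length : Int) ≤ y.1 ∧ y.1 < (orig.length : Int)))
    (hP2 : ∀ x ∈ f, ∀ y ∈ f, pvActive f x = true → pvActive f y = true →
      cellN orig.length x.1 = cellN orig.length y.1 → x.1 = y.1 ∧ x.2 = y.2) :
    BVal orig orig.length f f (igualar_posicion_repetidos_alt orig f) := by
  have hrw : igualar_posicion_repetidos_alt orig f
      = f.foldl (fun pos x => if pvMin f x.2 < x.1
          then PySem.List.pySetD pos x.1 (PySem.List.pyGetD pos (pvMin f x.2) 0) else pos) orig := by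
    rw [igualar_posicion_repetidos_alt]
    apply PySem.List.foldl_congr_mem
    intro pos x hxf
    simp only [pvStepB, pvMenor_getD f x hxf]
  rw [hrw]
  have base : BVal orig orig.length f [] orig := by
    refine ⟨rfl, ?_, ?_⟩
    · intro c hc _; rfl
    · intro y hy _; cases hy
  have main : ∀ (R Q : List (Int × String)), (∀ z ∈ Q, z ∈ f) → (∀ z ∈ R, z ∈ f) →
      ∀ pos, BVal orig orig.length f Q pos →
      BVal orig orig.length f (Q ++ R)
        (R.foldl (fun pos x => if pvMin f x.2 < x.1
          then PySem.List.pySetD pos x.1 (PySem.List.pyGetD pos (pvMin f x.2) 0) else pos) pos) := by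
    intro R
    induction R with
    | nil =>
      intro Q hQ _ pos h
      simpa using h
    | cons r R ih =>
      intro Q hQ hR pos h
      have h' := BStep orig f hP1 hP2 Q hQ r (hR r List.mem_cons_self) pos h
      have h'' := ih (Q ++ [r])
        (by
          intro z hz
          rcases List.mem_append.mp hz with h3 | h3
          · exact hQ z h3
          · rw [List.mem_singleton] at h3; rw [h3]; exact hR r List.mem_cons_self)
        (fun z hz => hR z (List.mem_cons_of_mem _ hz)) _ h'
      simpa [List.append_assoc] using h''
  have h := main f [] (by intro z hz; cases hz) (fun z hz => hz) orig base
  simpa using h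

-- ===== VERDICT (by name: the statement is the Claim_ definition above) =====
theorem igualar_posicion_repetidos_spec : Claim_equal_igualar_posicion_repetidos := by
  intro posicion filtrado _hD hP
  obtain ⟨hP1, hP2⟩ := hP
  unfold Spec_igualar_posicion_repetidos
  obtain ⟨hlenA, hA1, hA2⟩ := A_final posicion filtrado hP1 hP2
  obtain ⟨hlenB, hB1, hB2⟩ := B_final posicion filtrado hP1 hP2
  apply List.ext_getElem (by rw [hlenA, hlenB])
  intro c hcA hcB
  have hc : c < posicion.length := by rw [hlenA] at hcA; exact hcA
  rw [← getD_of_lt _ c hcA, ← getD_of_lt _ c hcB]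
  by_cases hEx : ∃ y ∈ filtrado, cellN posicion.length y.1 = (c : Int) ∧ pvMin filtrado y.2 < y.1
  · obtain ⟨y, hy, hcell, hmin⟩ := hEx
    have hgy : y.1 ∈ pvGrp filtrado y.2 := (mem_pvGrp _ _ _).mpr ⟨y, hy, rfl, rfl⟩
    have hgne : pvGrp filtrado y.2 ≠ [] := by intro hh; rw [hh] at hgy; cases hgy
    obtain ⟨z, hz, hzp, hza⟩ := (mem_pvGrp filtrado y.2 (pvMin filtrado y.2)).mp (lmin_mem _ hgne)
    have hr := hP1 z hz y hy hzp (by omega)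
    have hby := cellN_bounds posicion.length y.1 hr.2.1 hr.2.2
    have hmemG : pvMin filtrado y.2 ∈ pvGrp (pvLow filtrado y.1) y.2 :=
      (mem_pvGrp_pvLow filtrado y.1 y.2 _).mpr ⟨z, hz, by omega, hzp, hza⟩
    have hGne : pvGrp (pvLow filtrado y.1) y.2 ≠ [] := by
      intro hh; rw [hh] at hmemG; cases hmemG
    have hle1 : lmin (pvGrp (pvLow filtrado y.1) y.2) ≤ pvMin filtrado y.2 := lmin_le _ _ hmemG
    have hle2 : pvMin filtrado y.2 ≤ lmin (pvGrp (pvLow filtrado y.1) y.2) := by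
      have hgm := lmin_mem _ hGne
      obtain ⟨w, hw, hwb, hwp, hwa⟩ := (mem_pvGrp_pvLow filtrado y.1 y.2 _).mp hgm
      have hmem2 : lmin (pvGrp (pvLow filtrado y.1) y.2) ∈ pvGrp filtrado y.2 :=
        (mem_pvGrp _ _ _).mpr ⟨w, hw, hwp, hwa⟩
      exact lmin_le _ _ hmem2
    have hminEq : lmin (pvGrp (pvLow filtrado y.1) y.2) = pvMin filtrado y.2 := by omega
    have hcNat : c = (cellN posicion.length y.1).toNat := by omega
    rw [hcNat]
    rw [hA2 y hy hGne, hminEq, hB2 y hy hmin]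
  · have hgA : ∀ y ∈ filtrado, cellN posicion.length y.1 = (c : Int) →
        pvGrp (pvLow filtrado y.1) y.2 = [] := by
      intro y hy hcell
      by_contra hne
      obtain ⟨a, ha⟩ := List.exists_mem_of_ne_nil _ hne
      obtain ⟨z, hz, hb, hp, ha'⟩ := (mem_pvGrp_pvLow filtrado y.1 y.2 a).mp ha
      have hmemGrp : z.1 ∈ pvGrp filtrado y.2 := (mem_pvGrp _ _ _).mpr ⟨z, hz, hp, rfl⟩
      have := lmin_le _ _ hmemGrp
      exact hEx ⟨y, hy, hcell, by unfold pvMin at *; omega⟩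
    have hgB : ∀ x ∈ filtrado, cellN posicion.length x.1 = (c : Int) →
        ¬ pvMin filtrado x.2 < x.1 :=
      fun x hx hcell hm => hEx ⟨x, hx, hcell, hm⟩
    rw [hA1 c hc hgA, hB1 c hc hgB]
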